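-- pv_equiv track=rewrite | github.com/uuuouou/PythonBash | handle_string.py | complementUnique
-- ===== SOURCE A (Python) =====
-- def complementUnique(s, keepSet, table = None, bench = None):
-- 	"""
-- 	write by liucz 2015-10-7
-- 	squeeze continuous repeated chars to one
--
-- 	@s       -> string to be dealt with
-- 	@keepSet -> chars set whose repetition are keeped
-- 	@table   -> replace the char to the corresponding target if exist
-- 	@bench   -> if char not in table and bench is not None then replace the char to bench
-- 	@return  -> string with no continuous repeated chars except those in keepSet
-- 	"""
-- 	if not s:
-- 		return s
--
-- 	t = ''
-- 	lastChar = s[0]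
-- 	times = 1
--
-- 	for c in s[1:]:
-- 		if c != lastChar:
-- 			if lastChar in keepSet:
-- 				t += lastChar * times
-- 			elif table and lastChar in table:
-- 				t += table[lastChar]
-- 			elif bench is not None:
-- 				t += bench
-- 			else:
-- 				t += lastChar
-- 			lastChar = c
-- 			times = 1
-- 		else:
-- 			times += 1
-- 	# deal with last char
-- 	if lastChar in keepSet:
-- 		t += lastChar * times
-- 	elif times == 1:
-- 		t += lastChar
-- 	elif table and lastChar in table:
-- 		t += table[lastChar]
-- 	elif bench is not None:
-- 		t += bench
-- 	else:
-- 		t += lastChar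
--
-- 	return t
-- ===== SOURCE B (Python) =====
-- def complementUnique(s, keepSet, table = None, bench = None):
--     """Two-phase rewrite: build (char, count) runs first, then render each run."""
--     if not s:
--         return s
--     # phase 1: run-length encode s
--     runs = []
--     for c in s:
--         if runs and runs[-1][0] == c:
--             runs[-1][1] += 1
--         else:
--             runs.append([c, 1])
--
--     def mid(c, n):
--         if c in keepSet:
--             return c * n
--         if table and c in table:
--             return table[c]
--         if bench is not None:
--             return bench
--         return c
--
--     c, n = runs[-1]
--     if c in keepSet:
--         last = c * n
--     elif n == 1:
--         last = c
--     elif table and c in table: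
--         last = table[c]
--     elif bench is not None:
--         last = bench
--     else:
--         last = c
--     # phase 2: render all runs but the last with the plain cascade
--     return ''.join(mid(c, n) for c, n in runs[:-1]) + last
-- ===== Notes on version B (the rewrite author's own statement) =====
-- stated objective: idiomatic
-- what changed: B run-length-encodes the string into (char, count) runs first, then renders the run list in a second pass (plain cascade for all runs but the last, the count==1 literal rule only for the last run), instead of A's single fold carrying (output, lastChar, times) state.
import Mathlib
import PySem

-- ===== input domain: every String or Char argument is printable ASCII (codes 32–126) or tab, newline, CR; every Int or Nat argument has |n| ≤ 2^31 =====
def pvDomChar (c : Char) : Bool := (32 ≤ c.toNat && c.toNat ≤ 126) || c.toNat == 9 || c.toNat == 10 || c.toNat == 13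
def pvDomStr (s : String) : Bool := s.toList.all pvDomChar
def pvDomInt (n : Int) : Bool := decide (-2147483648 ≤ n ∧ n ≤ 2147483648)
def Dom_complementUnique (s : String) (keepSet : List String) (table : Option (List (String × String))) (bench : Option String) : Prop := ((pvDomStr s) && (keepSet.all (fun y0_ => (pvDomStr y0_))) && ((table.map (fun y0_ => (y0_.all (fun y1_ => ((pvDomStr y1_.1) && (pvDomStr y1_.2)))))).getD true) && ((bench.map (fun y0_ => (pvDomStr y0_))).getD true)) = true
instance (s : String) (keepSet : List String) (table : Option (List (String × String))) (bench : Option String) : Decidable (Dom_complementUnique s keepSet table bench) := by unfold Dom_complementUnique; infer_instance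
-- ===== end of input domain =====

-- B rewrites A's single stateful fold as a two-phase pipeline (run-length encode, then render the runs), same values, same O(n) cost.
-- ===== PORT A =====
-- truthiness of `table and c in table`: table non-None, non-empty, and key present
def pvTblHasA (table : Option (List (String × String))) (cs : String) : Bool :=
  match table with
  | some l => !l.isEmpty && l.any (fun p => p.1 == cs)
  | none => false

def pvTblGetA (table : Option (List (String × String))) (cs : String) : String :=
  match table with
  | some l => ((l.lookup cs).getD "")
  | none => ""

-- the body of A's for-loop, as a fold step over (t, lastChar, times)
def pvStepA (keepSet : List String) (table : Option (List (String × String))) (bench : Option String)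
    (st : String × Char × Nat) (c : Char) : String × Char × Nat :=
  let (t, lastChar, times) := st
  if c ≠ lastChar then
    let lc := String.singleton lastChar
    let t' :=
      if keepSet.contains lc then t ++ String.ofList (List.replicate times lastChar)
      else if pvTblHasA table lc then t ++ pvTblGetA table lc
      else match bench with
        | some b => t ++ b
        | none => t ++ lc
    (t', c, 1)
  else
    (t, lastChar, times + 1)

-- A's trailing "deal with last char" cascade
def pvLastA (keepSet : List String) (table : Option (List (String × String))) (bench : Option String)
    (t : String) (lastChar : Char) (times : Nat) : String :=
  let lc := String.singleton lastChar
  if keepSet.contains lc then t ++ String.ofList (List.replicate times lastChar)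
  else if times == 1 then t ++ lc
  else if pvTblHasA table lc then t ++ pvTblGetA table lc
  else match bench with
    | some b => t ++ b
    | none => t ++ lc

def complementUnique (s : String) (keepSet : List String) (table : Option (List (String × String))) (bench : Option String) : String :=
  if s.isEmpty then s
  else
    match s.toList with
    | [] => s
    | c0 :: rest =>
      let (t, lastChar, times) := rest.foldl (pvStepA keepSet table bench) ("", c0, 1)
      pvLastA keepSet table bench t lastChar times

-- ===== PORT B =====
-- B phase 1: run-length encoding of the character list
def pvMergeRun (c : Char) (n : Nat) : List (Char × Nat) → List (Char × Nat)
  | (d, k) :: rest => if c = d then (c, n + k) :: rest else (c, n) :: (d, k) :: rest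
  | [] => [(c, n)]

def pvRuns : List Char → List (Char × Nat)
  | [] => []
  | c :: cs => pvMergeRun c 1 (pvRuns cs)

-- B's plain cascade for every run but the last
def pvMidB (keepSet : List String) (table : Option (List (String × String))) (bench : Option String)
    (c : Char) (n : Nat) : String :=
  let cs := String.singleton c
  if keepSet.contains cs then String.ofList (List.replicate n c)
  else if (match table with
           | some l => !l.isEmpty && l.any (fun p => p.1 == cs)
           | none => false) then (match table with
                                  | some l => (l.lookup cs).getD ""
                                  | none => "")
  else match bench with
    | some b => b
    | none => cs

-- B's cascade for the last run (count-1 runs kept literally)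
def pvLastB (keepSet : List String) (table : Option (List (String × String))) (bench : Option String)
    (c : Char) (n : Nat) : String :=
  let cs := String.singleton c
  if keepSet.contains cs then String.ofList (List.replicate n c)
  else if n == 1 then cs
  else if (match table with
           | some l => !l.isEmpty && l.any (fun p => p.1 == cs)
           | none => false) then (match table with
                                  | some l => (l.lookup cs).getD ""
                                  | none => "")
  else match bench with
    | some b => b
    | none => cs

-- B phase 2: render the run list, last run specially
def pvRender (keepSet : List String) (table : Option (List (String × String))) (bench : Option String) : List (Char × Nat) → String
  | [] => ""
  | [(c, n)] => pvLastB keepSet table bench c n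
  | (c, n) :: r :: rest => pvMidB keepSet table bench c n ++ pvRender keepSet table bench (r :: rest)

def complementUnique_alt (s : String) (keepSet : List String) (table : Option (List (String × String))) (bench : Option String) : String :=
  if s.isEmpty then s
  else pvRender keepSet table bench (pvRuns s.toList)

-- ===== PRECONDITION & SPEC =====
def Spec_complementUnique (s : String) (keepSet : List String) (table : Option (List (String × String))) (bench : Option String) (out : String) : Prop := out = complementUnique_alt s keepSet table bench
instance (s : String) (keepSet : List String) (table : Option (List (String × String))) (bench : Option String) (out : String) : Decidable (Spec_complementUnique s keepSet table bench out) := by unfold Spec_complementUnique; infer_instance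

-- ===== CLAIM (what is proved, stated in full; the proofs are below) =====
def Claim_equal_complementUnique : Prop := ∀ (s : String) (keepSet : List String) (table : Option (List (String × String))) (bench : Option String), Dom_complementUnique s keepSet table bench → Spec_complementUnique s keepSet table bench (complementUnique s keepSet table bench)

-- ===== LEMMAS AND PROOFS =====
theorem pvMergeRun_shape (c : Char) (n : Nat) (rs : List (Char × Nat)) :
    ∃ k rest, pvMergeRun c n rs = (c, k) :: rest := by
  cases rs with
  | nil => exact ⟨n, [], rfl⟩
  | cons p r =>
    obtain ⟨d, k⟩ := p
    by_cases h : c = d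
    · exact ⟨n + k, r, by simp [pvMergeRun, h]⟩
    · exact ⟨n, (d, k) :: r, by simp [pvMergeRun, h]⟩

theorem pvMergeRun_merge (c : Char) (n m : Nat) (rs : List (Char × Nat)) :
    pvMergeRun c n (pvMergeRun c m rs) = pvMergeRun c (n + m) rs := by
  cases rs with
  | nil => simp [pvMergeRun]
  | cons p r =>
    obtain ⟨d, k⟩ := p
    by_cases h : c = d
    · simp [pvMergeRun, h, Nat.add_assoc]
    · simp [pvMergeRun, h]

theorem pvStepA_ne (K : List String) (T : Option (List (String × String))) (B : Option String)
    (t : String) (lc c : Char) (n : Nat) (h : c ≠ lc) :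
    pvStepA K T B (t, lc, n) c = (t ++ pvMidB K T B lc n, c, 1) := by
  simp only [pvStepA, pvMidB, pvTblHasA, pvTblGetA, h, if_pos, ne_eq, not_false_eq_true]
  split_ifs <;> cases B <;> rfl

theorem pvStepA_eq (K : List String) (T : Option (List (String × String))) (B : Option String)
    (t : String) (lc : Char) (n : Nat) :
    pvStepA K T B (t, lc, n) lc = (t, lc, n + 1) := by
  simp [pvStepA]

theorem pvLastA_split (K : List String) (T : Option (List (String × String))) (B : Option String)
    (t : String) (lc : Char) (n : Nat) :
    pvLastA K T B t lc n = t ++ pvLastB K T B lc n := by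
  simp only [pvLastA, pvLastB, pvTblHasA, pvTblGetA]
  split_ifs <;> cases B <;> rfl

theorem pvRender_cons (K : List String) (T : Option (List (String × String))) (B : Option String)
    (c : Char) (n : Nat) (rs : List (Char × Nat)) (h : rs ≠ []) :
    pvRender K T B ((c, n) :: rs) = pvMidB K T B c n ++ pvRender K T B rs := by
  cases rs with
  | nil => exact absurd rfl h
  | cons r rest => rfl

theorem pvKey (K : List String) (T : Option (List (String × String))) (B : Option String) :
    ∀ (l : List Char) (t : String) (lc : Char) (n : Nat),
      pvLastA K T B (l.foldl (pvStepA K T B) (t, lc, n)).1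
        (l.foldl (pvStepA K T B) (t, lc, n)).2.1
        (l.foldl (pvStepA K T B) (t, lc, n)).2.2
      = t ++ pvRender K T B (pvMergeRun lc n (pvRuns l)) := by
  intro l
  induction l with
  | nil =>
    intro t lc n
    simp [pvRuns, pvMergeRun, pvRender, pvLastA_split]
  | cons c cs ih =>
    intro t lc n
    by_cases h : c = lc
    · subst h
      rw [List.foldl_cons, pvStepA_eq, ih]
      simp [pvRuns, pvMergeRun_merge]
    · rw [List.foldl_cons, pvStepA_ne K T B t lc c n h, ih]
      obtain ⟨k, rest, hk⟩ := pvMergeRun_shape c 1 (pvRuns cs)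
      show t ++ pvMidB K T B lc n ++ pvRender K T B (pvMergeRun c 1 (pvRuns cs))
        = t ++ pvRender K T B (pvMergeRun lc n (pvRuns (c :: cs)))
      rw [pvRuns, hk]
      have hlc : lc ≠ c := fun e => h e.symm
      rw [show pvMergeRun lc n ((c, k) :: rest) = (lc, n) :: (c, k) :: rest by
            simp [pvMergeRun, hlc]]
      rw [pvRender_cons K T B lc n ((c, k) :: rest) (by simp)]
      rw [String.append_assoc]

-- ===== VERDICT (by name: the statement is the Claim_ definition above) =====
theorem complementUnique_spec : Claim_equal_complementUnique := by
  intro s K T B _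
  unfold Spec_complementUnique complementUnique complementUnique_alt
  by_cases hs : s.isEmpty
  · simp [hs]
  · simp only [hs]
    cases hl : s.toList with
    | nil =>
      exfalso
      exact hs (by simpa [String.isEmpty_iff, ← String.toList_eq_nil_iff] using hl)
    | cons c0 rest =>
      show pvLastA K T B (rest.foldl (pvStepA K T B) ("", c0, 1)).1
          (rest.foldl (pvStepA K T B) ("", c0, 1)).2.1
          (rest.foldl (pvStepA K T B) ("", c0, 1)).2.2
        = pvRender K T B (pvRuns (c0 :: rest))
      rw [pvKey K T B rest "" c0 1]
      simp [pvRuns]
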